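-- pv_equiv track=rewrite | github.com/pypi-data/pypi-mirror-82 | packages/jatime/jatime-0.1.0.tar.gz/jatime-0.1.0/jatime/finder.py | _years_close_to
-- ===== SOURCE A (Python) =====
-- from typing import Generator, Optional, Tuple
--
-- def _years_close_to(
--     base_year: int, max_diff: Optional[int] = None
-- ) -> Generator[int, None, None]:
--     if max_diff is None:
--         max_diff = 50
--
--     year = base_year
--     for i in range(max_diff * 2):
--         if i % 2 == 0:
--             year -= i
--         else:
--             year += i
--         yield year
-- ===== SOURCE B (Python) =====
-- from typing import Generator, Optional
--
--
-- def _years_close_to(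
--     base_year: int, max_diff: Optional[int] = None
-- ) -> Generator[int, None, None]:
--     if max_diff is None:
--         max_diff = 50
--     if max_diff <= 0:
--         return
--     yield base_year
--     for d in range(1, max_diff):
--         yield base_year + d
--         yield base_year - d
--     yield base_year + max_diff
-- ===== Notes on version B (the rewrite author's own statement) =====
-- stated objective: alternative
-- what changed: B computes each yielded year directly as base_year plus/minus a distance d (base, then the pair base+d/base-d for each d, then the closing base+max_diff) instead of mutating a running accumulator that alternately subtracts and adds the loop index.
import Mathlib
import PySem

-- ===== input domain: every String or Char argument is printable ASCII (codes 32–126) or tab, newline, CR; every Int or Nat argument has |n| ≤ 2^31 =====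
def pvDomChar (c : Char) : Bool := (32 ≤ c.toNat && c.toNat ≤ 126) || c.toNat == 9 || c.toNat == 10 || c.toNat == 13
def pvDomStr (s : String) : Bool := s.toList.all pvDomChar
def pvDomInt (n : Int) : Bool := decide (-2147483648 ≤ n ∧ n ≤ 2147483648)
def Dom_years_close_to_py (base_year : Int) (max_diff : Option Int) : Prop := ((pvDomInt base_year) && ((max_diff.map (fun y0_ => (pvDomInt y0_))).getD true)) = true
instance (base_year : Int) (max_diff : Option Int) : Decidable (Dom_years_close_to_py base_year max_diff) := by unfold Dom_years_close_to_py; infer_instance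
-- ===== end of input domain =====

-- B rebuilds the spiral directly from distances (base, then base±d pairs, then base+max_diff)
-- instead of A's sign-alternating running accumulator; alternative decomposition, same cost.


-- ===== PORT A =====
-- literal transliteration of A: running accumulator `year`, loop over range(max_diff*2)
def years_close_to_py (base_year : Int) (max_diff : Option Int) : List Int :=
  let m := max_diff.getD 50
  ((PySem.List.pyRange 0 (m * 2) 1).foldl
      (fun (s : Int × List Int) i =>
        let y := if PySem.Int.mod i 2 = 0 then s.1 - i else s.1 + i
        (y, s.2 ++ [y]))
      (base_year, [])).2

-- ===== PORT B =====
-- literal transliteration of B: guard, head, distance pairs, closing element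
def years_close_to_py_alt (base_year : Int) (max_diff : Option Int) : List Int :=
  let m := max_diff.getD 50
  if m ≤ 0 then []
  else
    base_year ::
      ((PySem.List.pyRange 1 m 1).foldl
          (fun acc d => acc ++ [base_year + d, base_year - d]) [])
      ++ [base_year + m]

-- ===== PRECONDITION & SPEC =====
def Spec_years_close_to_py (base_year : Int) (max_diff : Option Int) (out : List Int) : Prop := out = years_close_to_py_alt base_year max_diff
instance (base_year : Int) (max_diff : Option Int) (out : List Int) : Decidable (Spec_years_close_to_py base_year max_diff out) := by unfold Spec_years_close_to_py; infer_instance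

-- ===== CLAIM (what is proved, stated in full; the proofs are below) =====
def Claim_equal_years_close_to_py : Prop := ∀ (base_year : Int) (max_diff : Option Int), Dom_years_close_to_py base_year max_diff → Spec_years_close_to_py base_year max_diff (years_close_to_py base_year max_diff)

-- ===== LEMMAS AND PROOFS =====

-- the common spiral list: L b 0 = [], L b (n+1) = L b n ++ [b - n, b + (n+1)]
def pvSpiral (b : Int) : Nat → List Int
  | 0 => []
  | n + 1 => pvSpiral b n ++ [b - n, b + (n + 1)]

-- A's fold state after 2n steps
theorem pvA_fold (b : Int) (n : Nat) :
    ((PySem.List.pyRange 0 ((n : Int) * 2) 1).foldl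
        (fun (s : Int × List Int) i =>
          let y := if PySem.Int.mod i 2 = 0 then s.1 - i else s.1 + i
          (y, s.2 ++ [y]))
        (b, [])) = (b + n, pvSpiral b n) := by
  induction n with
  | zero => simp [PySem.List.pyRange_one_eq_nil, pvSpiral]
  | succ n ih =>
    have h1 : ((n : Int) + 1) * 2 = ((n : Int) * 2 + 1) + 1 := by ring
    have h2 : (n : Int) * 2 + 1 = ((n : Int) * 2) + 1 := rfl
    push_cast
    rw [h1, PySem.List.pyRange_one_succ_right (by positivity),
        PySem.List.pyRange_one_succ_right (by positivity)]
    rw [List.foldl_append, List.foldl_append]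
    have ihc : ((PySem.List.pyRange 0 ((n : Int) * 2) 1).foldl
        (fun (s : Int × List Int) i =>
          let y := if PySem.Int.mod i 2 = 0 then s.1 - i else s.1 + i
          (y, s.2 ++ [y]))
        (b, [])) = (b + n, pvSpiral b n) := ih
    rw [ihc]
    have he : PySem.Int.mod ((n : Int) * 2) 2 = 0 := by
      rw [PySem.Int.mod_eq_zero_iff_dvd]; exact ⟨n, by ring⟩
    have ho : PySem.Int.mod ((n : Int) * 2 + 1) 2 = 1 := by
      rw [PySem.Int.mod_eq_emod_of_pos (by omega : (0:Int) < 2)]; omega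
    simp only [List.foldl_cons, List.foldl_nil, he, ho]
    norm_num [pvSpiral]
    constructor
    · ring
    · constructor
      · ring
      · ring

-- B's inner fold builds the same spiral, missing head and closing element
theorem pvB_fold (b : Int) (n : Nat) (hn : 1 ≤ n) :
    b :: ((PySem.List.pyRange 1 (n : Int) 1).foldl
        (fun acc d => acc ++ [b + d, b - d]) []) ++ [b + n] = pvSpiral b n := by
  induction n with
  | zero => omega
  | succ n ih =>
    by_cases h : 1 ≤ n
    · push_cast
      rw [PySem.List.pyRange_one_succ_right (by exact_mod_cast h), List.foldl_append]
      have := ih h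
      push_cast at this
      simp only [List.foldl_cons, List.foldl_nil, pvSpiral]
      rw [← this]
      simp
    · have : n = 0 := by omega
      subst this
      simp [pvSpiral, PySem.List.pyRange_one_eq_nil]

theorem pvRange_nil_of_nonpos (m : Int) (hm : m ≤ 0) :
    PySem.List.pyRange 0 (m * 2) 1 = [] :=
  PySem.List.pyRange_one_eq_nil (by omega)

-- ===== VERDICT (by name: the statement is the Claim_ definition above) =====
theorem years_close_to_py_spec : Claim_equal_years_close_to_py := by
  intro base_year max_diff _
  unfold Spec_years_close_to_py years_close_to_py years_close_to_py_alt
  set m := max_diff.getD 50 with hm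
  by_cases hle : m ≤ 0
  · simp [hle, pvRange_nil_of_nonpos m hle]
  · have hpos : 0 < m := by omega
    have hn : m = ((m.toNat : Nat) : Int) := by omega
    simp only [if_neg hle]
    rw [hn, pvA_fold base_year m.toNat, pvB_fold base_year m.toNat (by omega)]
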